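-- pv_equiv track=rewrite | github.com/bwolfson2/googlexyz | app/engine/processors/combined_processors.py | get_result_dicts
-- ===== SOURCE A (Python) =====
-- def get_result_dicts(ordered_results):
--     results = ordered_results.copy()
--     rows = []
--     while sum([len(i) for i in results]) > 1:
--         for e, a in enumerate(results):
--             if len(a) > 0:
--                 row = a[-1]
--                 rows.append(row)
--                 results[e] = a[0:-1]
--     return rows
-- ===== SOURCE B (Python) =====
-- def get_result_dicts(ordered_results):
--     lens = [len(a) for a in ordered_results]
--     remaining = sum(lens)
--     rows = []
--     r = 0
--     while remaining > 1:
--         cnt = 0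
--         for a, L in zip(ordered_results, lens):
--             if L > r:
--                 rows.append(a[L - 1 - r])
--                 cnt += 1
--         remaining -= cnt
--         r += 1
--     return rows
-- ===== Notes on version B (the rewrite author's own statement) =====
-- stated objective: faster
-- what changed: Instead of repeatedly slicing every sublist (results[e] = a[0:-1]) and re-summing lengths each round, B precomputes the lengths once and reads element a[L-1-r] directly per round r, tracking the remaining count arithmetically, so no list is ever copied.
import Mathlib
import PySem

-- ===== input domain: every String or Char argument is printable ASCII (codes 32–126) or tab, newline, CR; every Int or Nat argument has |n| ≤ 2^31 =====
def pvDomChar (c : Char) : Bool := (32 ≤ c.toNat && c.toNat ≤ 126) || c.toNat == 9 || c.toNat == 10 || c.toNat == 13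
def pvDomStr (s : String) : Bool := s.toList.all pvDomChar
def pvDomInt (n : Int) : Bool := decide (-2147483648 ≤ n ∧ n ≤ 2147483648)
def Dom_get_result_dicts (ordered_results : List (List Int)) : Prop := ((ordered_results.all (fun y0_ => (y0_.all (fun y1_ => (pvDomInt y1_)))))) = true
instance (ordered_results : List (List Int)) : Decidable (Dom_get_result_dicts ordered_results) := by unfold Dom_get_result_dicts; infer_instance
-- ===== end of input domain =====

-- B replaces A's per-round slicing (results[e] = a[0:-1]) by direct indexing a[L-1-r]
-- with precomputed lengths and an arithmetically tracked remaining count (objective: faster).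

-- ===== PORT A =====
-- sum([len(i) for i in results])
def pvSumLens (rs : List (List Int)) : Nat := (rs.map List.length).sum

-- one pass of 'for e, a in enumerate(results): if len(a) > 0: rows.append(a[-1]); results[e] = a[0:-1]'
-- a[-1] on the guarded nonempty list is PySem.List.pyGetD a (-1) 0 (exact: never the default);
-- a[0:-1] is PySem.List.slice a (some 0) (some (-1)).
def pvRoundA : List (List Int) → List Int → (List (List Int) × List Int)
  | [], rows => ([], rows)
  | a :: rest, rows =>
    if 0 < a.length then
      let row := PySem.List.pyGetD a (-1) 0
      let (rest', rows') := pvRoundA rest (rows ++ [row])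
      (PySem.List.slice a (some 0) (some (-1)) :: rest', rows')
    else
      let (rest', rows') := pvRoundA rest rows
      (a :: rest', rows')

-- 'while sum(...) > 1: <round>'; fuel = initial total + 1 is a totality guard only:
-- each executed round strictly decreases the total, so the fuel never runs out first.
def pvLoopA : Nat → List (List Int) → List Int → List Int
  | 0, _, rows => rows
  | fuel + 1, results, rows =>
    if 1 < pvSumLens results then
      let (results', rows') := pvRoundA results rows
      pvLoopA fuel results' rows'
    else rows

def get_result_dicts (ordered_results : List (List Int)) : List Int :=
  pvLoopA (pvSumLens ordered_results + 1) ordered_results []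

-- ===== PORT B =====
-- 'for a, L in zip(ordered_results, lens): if L > r: rows.append(a[L-1-r]); cnt += 1'
-- (L = len(a); the index L-1-r is in range under the guard, ported as List.getD _ _ 0, exact here)
def pvRoundB : List (List Int) → Nat → List Int → Nat → (List Int × Nat)
  | [], _, rows, cnt => (rows, cnt)
  | a :: rest, r, rows, cnt =>
    if r < a.length then
      pvRoundB rest r (rows ++ [a.getD (a.length - 1 - r) 0]) (cnt + 1)
    else
      pvRoundB rest r rows cnt

-- 'while remaining > 1: <round>; remaining -= cnt; r += 1'; same totality fuel as port A.
def pvLoopB : Nat → List (List Int) → Nat → Nat → List Int → List Int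
  | 0, _, _, _, rows => rows
  | fuel + 1, rs, r, remaining, rows =>
    if 1 < remaining then
      let (rows', cnt) := pvRoundB rs r rows 0
      pvLoopB fuel rs (r + 1) (remaining - cnt) rows'
    else rows

def get_result_dicts_alt (ordered_results : List (List Int)) : List Int :=
  pvLoopB (pvSumLens ordered_results + 1) ordered_results 0 (pvSumLens ordered_results) []

-- ===== PRECONDITION & SPEC =====
def Spec_get_result_dicts (ordered_results : List (List Int)) (out : List Int) : Prop := out = get_result_dicts_alt ordered_results
instance (ordered_results : List (List Int)) (out : List Int) : Decidable (Spec_get_result_dicts ordered_results out) := by unfold Spec_get_result_dicts; infer_instance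

-- ===== CLAIM (what is proved, stated in full; the proofs are below) =====
def Claim_equal_get_result_dicts : Prop := ∀ (ordered_results : List (List Int)), Dom_get_result_dicts ordered_results → Spec_get_result_dicts ordered_results (get_result_dicts ordered_results)

-- ===== LEMMAS AND PROOFS =====

-- the elements round r picks, round-major
def pvPicks (rs : List (List Int)) (r : Nat) : List Int :=
  rs.filterMap (fun a => if r < a.length then some (a.getD (a.length - 1 - r) 0) else none)

theorem pvRoundB_eq (rs : List (List Int)) (r : Nat) (rows : List Int) (cnt : Nat) :
    pvRoundB rs r rows cnt = (rows ++ pvPicks rs r, cnt + (pvPicks rs r).length) := by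
  induction rs generalizing rows cnt with
  | nil => simp [pvRoundB, pvPicks]
  | cons a rest ih =>
    by_cases h : r < a.length <;> simp [pvRoundB, pvPicks, h, ih] at * <;> omega

-- A's state after r rounds, expressed on the original input
def pvStateF (r : Nat) (a : List Int) : List Int := a.take (a.length - r)

theorem pvRoundA_eq (rs : List (List Int)) (r : Nat) (rows : List Int) :
    pvRoundA (rs.map (pvStateF r)) rows = (rs.map (pvStateF (r + 1)), rows ++ pvPicks rs r) := by
  induction rs generalizing rows with
  | nil => simp [pvRoundA, pvPicks]
  | cons a rest ih =>
    by_cases h : r < a.length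
    · have hlen : (pvStateF r a).length = a.length - r := by
        simp [pvStateF]
      have hpos : 0 < (pvStateF r a).length := by omega
      have hne : pvStateF r a ≠ [] := by
        intro hc; rw [hc] at hpos; simp at hpos
      have hlast : PySem.List.pyGetD (pvStateF r a) (-1) 0 = a.getD (a.length - 1 - r) 0 := by
        rw [PySem.List.pyGetD_neg_one _ 0 hne, List.getLast_eq_getElem]
        simp only [pvStateF, List.length_take]
        rw [List.getElem_take]
        rw [List.getD_eq_getElem _ _ (by omega)]
        congr 1
        omega
      have hslice : PySem.List.slice (pvStateF r a) (some 0) (some (-1)) = pvStateF (r + 1) a := by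
        simp only [PySem.List.slice_zero_start, PySem.List.slice_to_neg_one]
        simp only [pvStateF, List.dropLast_eq_take, List.length_take, List.take_take]
        congr 1
        omega
      simp only [List.map_cons, pvRoundA, hpos, if_pos, hlast, hslice, ih, pvPicks,
        List.filterMap_cons, h, if_pos]
      simp
    · have hlen : (pvStateF r a).length = a.length - r := by simp [pvStateF]
      have hz : ¬ 0 < (pvStateF r a).length := by omega
      have hsame : pvStateF r a = pvStateF (r + 1) a := by
        simp only [pvStateF]
        congr 1
        omega
      simp only [List.map_cons, pvRoundA, hz, if_neg, not_false_iff, ih, pvPicks,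
        List.filterMap_cons, h, if_neg]
      simp [hsame]

theorem pvSum_state (rs : List (List Int)) (r : Nat) :
    pvSumLens (rs.map (pvStateF r)) =
      pvSumLens (rs.map (pvStateF (r + 1))) + (pvPicks rs r).length := by
  induction rs with
  | nil => simp [pvSumLens, pvPicks]
  | cons a rest ih =>
    have hA : (pvStateF r a).length = a.length - r := by simp [pvStateF]
    have hB : (pvStateF (r + 1) a).length = a.length - (r + 1) := by simp [pvStateF]
    by_cases h : r < a.length <;>
      simp only [pvSumLens, pvPicks, List.map_cons, List.map_map, List.sum_cons,
        List.filterMap_cons, if_pos, if_neg, h, not_false_iff, List.length_cons] at ih ⊢ <;>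
      omega

theorem pvLoop_eq (fuel : Nat) (rs : List (List Int)) (r : Nat) (rows : List Int) :
    pvLoopA fuel (rs.map (pvStateF r)) rows =
      pvLoopB fuel rs r (pvSumLens (rs.map (pvStateF r))) rows := by
  induction fuel generalizing r rows with
  | zero => rfl
  | succ fuel ih =>
    by_cases h : 1 < pvSumLens (rs.map (pvStateF r))
    · simp only [pvLoopA, pvLoopB, h, if_pos, pvRoundA_eq, pvRoundB_eq, Nat.zero_add]
      rw [ih (r + 1)]
      have hs := pvSum_state rs r
      have : pvSumLens (rs.map (pvStateF r)) - (pvPicks rs r).length =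
          pvSumLens (rs.map (pvStateF (r + 1))) := by omega
      rw [this]
    · simp [pvLoopA, pvLoopB, h]

theorem pvStateF_zero (rs : List (List Int)) : rs.map (pvStateF 0) = rs := by
  simp only [show pvStateF 0 = id from funext fun a => by simp [pvStateF], List.map_id]

-- ===== VERDICT (by name: the statement is the Claim_ definition above) =====
theorem get_result_dicts_spec : Claim_equal_get_result_dicts := by
  intro rs _
  unfold Spec_get_result_dicts get_result_dicts get_result_dicts_alt
  have h := pvLoop_eq (pvSumLens rs + 1) rs 0 []
  rw [pvStateF_zero] at h
  exact h
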